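-- pv_equiv track=rewrite | github.com/Fenriz1349/Lotopython | lotopython/fonctions.py | lotoMoinsRecurent
-- ===== SOURCE A (Python) =====
-- def lotoMoinsRecurent(dicoOccu,dicoBonus):
--     dicoOccurencesMoins=dict(sorted(dicoOccu.items(), key=lambda item:item[1])).copy()
--     bonus=sorted(dicoBonus.items(), key=lambda item:item[1])[0][0]
--     liste=[]
--     for i in dicoOccurencesMoins.keys():
--         if len(liste)<5:
--             liste.append(i)
--         else :break
--     liste.append(bonus)
--     return liste
-- ===== SOURCE B (Python) =====
-- def lotoMoinsRecurent(dicoOccu, dicoBonus):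
--     # Selection instead of a full sort: extract the first least-frequent item
--     # up to five times, then the first least-frequent bonus via min().
--     items = list(dicoOccu.items())
--     liste = []
--     while items and len(liste) < 5:
--         best = min(items, key=lambda it: it[1])
--         liste.append(best[0])
--         items.remove(best)
--     liste.append(min(dicoBonus.items(), key=lambda it: it[1])[0])
--     return liste
-- ===== Notes on version B (the rewrite author's own statement) =====
-- stated objective: alternative
-- what changed: Replaces the full stable sort plus dict-rebuild plus break-loop with repeated first-minimum selection (min + remove, at most five passes) and a single min() for the bonus; no sort and no intermediate dict are built.
import Mathlib
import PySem

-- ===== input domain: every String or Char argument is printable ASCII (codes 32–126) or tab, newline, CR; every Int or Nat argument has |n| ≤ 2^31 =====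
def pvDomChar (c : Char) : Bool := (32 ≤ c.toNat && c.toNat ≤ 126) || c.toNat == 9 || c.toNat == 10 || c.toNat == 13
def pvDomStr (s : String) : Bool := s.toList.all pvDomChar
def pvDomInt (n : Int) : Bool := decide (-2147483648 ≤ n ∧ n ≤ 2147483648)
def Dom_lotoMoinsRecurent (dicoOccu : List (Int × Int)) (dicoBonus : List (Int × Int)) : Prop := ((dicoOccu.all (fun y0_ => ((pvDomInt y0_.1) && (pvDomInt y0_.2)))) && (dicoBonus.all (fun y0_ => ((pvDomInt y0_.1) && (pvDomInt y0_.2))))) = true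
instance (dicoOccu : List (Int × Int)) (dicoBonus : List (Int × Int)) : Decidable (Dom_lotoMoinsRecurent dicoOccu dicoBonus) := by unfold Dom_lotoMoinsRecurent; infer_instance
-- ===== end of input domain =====

-- B replaces A's full stable sort + dict rebuild + break-loop by at most five first-minimum
-- selections (min + remove) and a single min() for the bonus (objective: alternative).

-- ===== PORT A =====
-- the 'for i in ….keys(): if len(liste)<5: append else break' loop of A
def lotoALoop : List Int → List Int → List Int
  | [], liste => liste
  | i :: ks, liste => if liste.length < 5 then lotoALoop ks (liste ++ [i]) else liste

def lotoMoinsRecurent (dicoOccu : List (Int × Int)) (dicoBonus : List (Int × Int)) : List Int :=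
  -- dict(sorted(dicoOccu.items(), key=lambda item: item[1])).copy()
  let dicoOccurencesMoins := PySem.Dict.ofList (PySem.List.sorted dicoOccu (fun item => item.2) false)
  -- sorted(dicoBonus.items(), key=lambda item: item[1])[0][0] — pyGet? is none exactly where Python raises IndexError (dicoBonus = []), excluded by Pre_
  let bonus := ((PySem.List.pyGet? (PySem.List.sorted dicoBonus (fun item => item.2) false) 0).map (fun p => p.1)).getD 0
  let liste := lotoALoop dicoOccurencesMoins.keys []
  liste ++ [bonus]

-- ===== PORT B =====
-- Source B's 'while items and len(liste) < 5' loop: each pass appends one element, so at most 5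
-- passes; min? is none exactly when items is empty (the 'items and' guard). items.remove(best)
-- is List.erase (first equal element removed; best ∈ items, so Python's remove cannot raise).
def lotoBLoop : Nat → List (Int × Int) → List Int → List Int
  | 0, _, liste => liste
  | n + 1, items, liste =>
    match PySem.List.min? items (fun it => it.2) with
    | none => liste
    | some best => lotoBLoop n (items.erase best) (liste ++ [best.1])

def lotoMoinsRecurent_alt (dicoOccu : List (Int × Int)) (dicoBonus : List (Int × Int)) : List Int :=
  let liste := lotoBLoop 5 dicoOccu []
  -- min(dicoBonus.items(), key=lambda it: it[1])[0] — min? is none exactly where Python raises ValueError (dicoBonus = []), excluded by Pre_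
  let bonus := ((PySem.List.min? dicoBonus (fun it => it.2)).map (fun p => p.1)).getD 0
  liste ++ [bonus]

-- ===== PRECONDITION & SPEC =====
-- dicoBonus ≠ []: on an empty bonus dict A raises IndexError (and B ValueError).
-- (dicoOccu.map Prod.fst).Nodup: the argument is a Python dict, whose keys are necessarily
-- distinct; an association list with duplicate keys represents no Python input at all
-- (dict() would collapse it), so nothing is claimed there.
def Pre_lotoMoinsRecurent (dicoOccu : List (Int × Int)) (dicoBonus : List (Int × Int)) : Prop :=
  dicoBonus ≠ [] ∧ (dicoOccu.map Prod.fst).Nodup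
instance (dicoOccu : List (Int × Int)) (dicoBonus : List (Int × Int)) : Decidable (Pre_lotoMoinsRecurent dicoOccu dicoBonus) := by unfold Pre_lotoMoinsRecurent; infer_instance

def pvWitness_lotoMoinsRecurent : (List (Int × Int)) × (List (Int × Int)) :=
  ([(1, 2), (2, 1), (3, 1)], [(7, 4), (8, 1)])

def Spec_lotoMoinsRecurent (dicoOccu : List (Int × Int)) (dicoBonus : List (Int × Int)) (out : List Int) : Prop := out = lotoMoinsRecurent_alt dicoOccu dicoBonus
instance (dicoOccu : List (Int × Int)) (dicoBonus : List (Int × Int)) (out : List Int) : Decidable (Spec_lotoMoinsRecurent dicoOccu dicoBonus out) := by unfold Spec_lotoMoinsRecurent; infer_instance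

-- ===== CLAIM (what is proved, stated in full; the proofs are below) =====
def Claim_equal_lotoMoinsRecurent : Prop := ∀ (dicoOccu : List (Int × Int)) (dicoBonus : List (Int × Int)), Dom_lotoMoinsRecurent dicoOccu dicoBonus → Pre_lotoMoinsRecurent dicoOccu dicoBonus → Spec_lotoMoinsRecurent dicoOccu dicoBonus (lotoMoinsRecurent dicoOccu dicoBonus)

-- ===== LEMMAS AND PROOFS =====

-- inserting the strict minimum lands at the head
theorem pvInsertBy_all_lt (key : Int × Int → Int) (m : Int × Int) (ys : List (Int × Int))
    (h : ∀ y ∈ ys, key m < key y) :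
    PySem.List.insertBy (fun a b => decide (key a < key b)) m ys = m :: ys := by
  cases ys with
  | nil => simp [PySem.List.insertBy]
  | cons y t => simp [PySem.List.insertBy, h y (by simp)]

-- inserting a non-smaller element keeps the head
theorem pvInsertBy_cons_ge (key : Int × Int → Int) (x m : Int × Int) (t : List (Int × Int))
    (h : ¬ key x < key m) :
    PySem.List.insertBy (fun a b => decide (key a < key b)) x (m :: t) =
      m :: PySem.List.insertBy (fun a b => decide (key a < key b)) x t := by
  simp [PySem.List.insertBy, h]

theorem pvFoldlIns_keep_head (key : Int × Int → Int) (m : Int × Int) :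
    ∀ (r : List (Int × Int)) (t : List (Int × Int)),
      (∀ x ∈ r, ¬ key x < key m) →
      r.foldl (fun acc x => PySem.List.insertBy (fun a b => decide (key a < key b)) x acc) (m :: t) =
        m :: r.foldl (fun acc x => PySem.List.insertBy (fun a b => decide (key a < key b)) x acc) t := by
  intro r
  induction r with
  | nil => intro t _; rfl
  | cons x r ih =>
    intro t h
    simp only [List.foldl_cons]
    rw [pvInsertBy_cons_ge key x m t (h x (by simp))]
    exact ih _ (fun z hz => h z (by simp [hz]))

-- the stable sort of a list splits off its first minimal element
theorem pvSorted_split (key : Int × Int → Int) (l r : List (Int × Int)) (m : Int × Int)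
    (hl : ∀ y ∈ l, key m < key y) (hr : ∀ y ∈ r, key m ≤ key y) :
    PySem.List.sorted (l ++ m :: r) key false = m :: PySem.List.sorted (l ++ r) key false := by
  rw [PySem.List.sorted_eq_foldl_insertBy, PySem.List.sorted_eq_foldl_insertBy,
      List.foldl_append, List.foldl_cons, List.foldl_append]
  have hmemS : ∀ y ∈ l.foldl (fun acc x => PySem.List.insertBy (fun a b => decide (key a < key b)) x acc) [], key m < key y := by
    intro y hy
    apply hl
    have := (PySem.List.mem_sorted l key false y).mp
    rw [PySem.List.sorted_eq_foldl_insertBy] at this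
    exact this hy
  rw [pvInsertBy_all_lt key m _ hmemS]
  exact pvFoldlIns_keep_head key m r _ (fun x hx => not_lt.mpr (hr x hx))

theorem pvMin?_cons_cons (key : Int × Int → Int) (x y : Int × Int) (t : List (Int × Int)) :
    PySem.List.min? (x :: y :: t) key =
      PySem.List.min? ((if key y < key x then y else x) :: t) key := by
  simp only [PySem.List.min?, List.foldl_cons]
  split <;> rfl

-- min? of a nonempty list is its FIRST minimal element: the list splits around it
theorem pvMin?_split (key : Int × Int → Int) :
    ∀ (xs : List (Int × Int)) (x : Int × Int),
      ∃ l r m, PySem.List.min? (x :: xs) key = some m ∧ x :: xs = l ++ m :: r ∧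
        (∀ y ∈ l, key m < key y) ∧ (∀ y ∈ r, key m ≤ key y) := by
  intro xs
  induction xs with
  | nil =>
    intro x
    exact ⟨[], [], x, by simp [PySem.List.min?], by simp, by simp, by simp⟩
  | cons y t ih =>
    intro x
    by_cases hyx : key y < key x
    · obtain ⟨l', r', m, h1, h2, h3, h4⟩ := ih y
      have hm : PySem.List.min? (x :: y :: t) key = some m := by
        rw [pvMin?_cons_cons key x y t, if_pos hyx]; exact h1
      have hmy : key m ≤ key y := PySem.List.min?_isMin h1 y (by simp)
      refine ⟨x :: l', r', m, hm, by rw [h2]; simp, ?_, h4⟩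
      intro z hz
      rcases List.mem_cons.mp hz with rfl | hz'
      · exact lt_of_le_of_lt hmy hyx
      · exact h3 z hz'
    · obtain ⟨l', r', m, h1, h2, h3, h4⟩ := ih x
      have hm : PySem.List.min? (x :: y :: t) key = some m := by
        rw [pvMin?_cons_cons key x y t, if_neg hyx]; exact h1
      cases l' with
      | nil =>
        simp only [List.nil_append, List.cons.injEq] at h2
        obtain ⟨rfl, rfl⟩ := h2
        refine ⟨[], y :: t, x, hm, by simp, by simp, ?_⟩
        intro z hz
        rcases List.mem_cons.mp hz with rfl | hz'
        · exact not_lt.mp hyx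
        · exact h4 z hz'
      | cons a l'' =>
        simp only [List.cons_append] at h2
        obtain ⟨rfl, ht⟩ : x = a ∧ t = l'' ++ m :: r' := by
          injection h2 with hh htl; exact ⟨hh, htl⟩
        have hmx : key m < key x := h3 x (by simp)
        refine ⟨x :: y :: l'', r', m, hm, by rw [ht]; simp, ?_, h4⟩
        intro z hz
        rcases List.mem_cons.mp hz with rfl | hz'
        · exact hmx
        rcases List.mem_cons.mp hz' with rfl | hz''
        · exact lt_of_lt_of_le hmx (not_lt.mp hyx)
        · exact h3 z (by simp [hz''])

theorem pvErase_split (key : Int × Int → Int) (l r : List (Int × Int)) (m : Int × Int)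
    (hl : ∀ y ∈ l, key m < key y) :
    (l ++ m :: r).erase m = l ++ r := by
  have hnm : m ∉ l := fun hm => lt_irrefl _ (hl m hm)
  rw [List.erase_append_right _ hnm, List.erase_cons_head]

-- combined: sorted xs = first-min :: sorted (xs minus its first occurrence)
theorem pvSorted_cons_min (key : Int × Int → Int) (xs : List (Int × Int)) (m : Int × Int)
    (h : PySem.List.min? xs key = some m) :
    PySem.List.sorted xs key false = m :: PySem.List.sorted (xs.erase m) key false := by
  cases xs with
  | nil => simp [PySem.List.min?] at h
  | cons x t =>
    obtain ⟨l, r, m', h1, h2, h3, h4⟩ := pvMin?_split key t x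
    have hmm : m' = m := by rw [h1] at h; injection h
    subst hmm
    rw [h2, pvSorted_split key l r m' h3 h4, pvErase_split key l r m' h3]

-- B's selection loop computes the first n keys of the stable sort
theorem pvLoopB_eq (n : Nat) :
    ∀ (items : List (Int × Int)) (liste : List Int),
      lotoBLoop n items liste =
        liste ++ ((PySem.List.sorted items (fun it => it.2) false).map (fun p => p.1)).take n := by
  induction n with
  | zero => intro items liste; simp [lotoBLoop]
  | succ n ih =>
    intro items liste
    cases hmin : PySem.List.min? items (fun it => it.2) with
    | none =>
      have : items = [] := (PySem.List.min?_eq_none_iff items _).mp hmin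
      subst this
      simp [lotoBLoop, PySem.List.min?, PySem.List.sorted]
    | some best =>
      rw [show lotoBLoop (n + 1) items liste =
            lotoBLoop n (items.erase best) (liste ++ [best.1]) by
          simp [lotoBLoop, hmin]]
      rw [ih, pvSorted_cons_min _ items best hmin]
      simp

-- A's break-loop takes the first 5 - |liste| keys
theorem pvLoopA_eq :
    ∀ (ks : List Int) (liste : List Int), liste.length ≤ 5 →
      lotoALoop ks liste = liste ++ ks.take (5 - liste.length) := by
  intro ks
  induction ks with
  | nil => intro liste _; simp [lotoALoop]
  | cons i ks ih =>
    intro liste h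
    by_cases h5 : liste.length < 5
    · rw [show lotoALoop (i :: ks) liste = lotoALoop ks (liste ++ [i]) by
          simp [lotoALoop, h5]]
      rw [ih _ (by simp; omega)]
      have : 5 - liste.length = (5 - (liste ++ [i]).length) + 1 := by simp; omega
      rw [this, List.take_succ_cons]
      simp
    · have : liste.length = 5 := by omega
      rw [show lotoALoop (i :: ks) liste = liste by simp [lotoALoop, h5]]
      simp [this]

-- keys of dict(pairs) for distinct keys: just the firsts, in order
theorem pvKeys_ofList (ps : List (Int × Int)) (h : (ps.map Prod.fst).Nodup) :
    (PySem.Dict.ofList ps).keys = ps.map Prod.fst := by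
  have hfresh : ∀ a ∈ ps, (PySem.Dict.empty : PySem.Dict Int Int).contains a.1 = false := by
    intro a _; exact PySem.Dict.contains_empty a.1
  have := PySem.Dict.items_foldl_insert_fresh ps (fun a => a.1) (fun a => a.2)
    (PySem.Dict.empty : PySem.Dict Int Int) hfresh h
  show ((PySem.Dict.ofList ps).items.map Prod.fst) = ps.map Prod.fst
  rw [show (PySem.Dict.ofList ps).items =
        (ps.foldl (fun d a => d.insert a.1 a.2) (PySem.Dict.empty : PySem.Dict Int Int)).items from rfl]
  rw [this]
  have hemp : (PySem.Dict.empty : PySem.Dict Int Int).items = [] := rfl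
  rw [hemp]
  simp

-- ===== VERDICT (by name: the statement is the Claim_ definition above) =====
theorem lotoMoinsRecurent_spec : Claim_equal_lotoMoinsRecurent := by
  intro dicoOccu dicoBonus _ hpre
  obtain ⟨hbon, hnd⟩ := hpre
  unfold Spec_lotoMoinsRecurent lotoMoinsRecurent lotoMoinsRecurent_alt
  show lotoALoop (PySem.Dict.ofList (PySem.List.sorted dicoOccu (fun item => item.2) false)).keys []
        ++ [((PySem.List.pyGet? (PySem.List.sorted dicoBonus (fun item => item.2) false) 0).map (fun p => p.1)).getD 0]
      = lotoBLoop 5 dicoOccu []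
        ++ [((PySem.List.min? dicoBonus (fun it => it.2)).map (fun p => p.1)).getD 0]
  -- the five least-frequent keys agree
  have hndS : ((PySem.List.sorted dicoOccu (fun item => item.2) false).map Prod.fst).Nodup := by
    have hperm : (PySem.List.sorted dicoOccu (fun item => item.2) false).Perm dicoOccu :=
      PySem.List.sorted_perm dicoOccu _ false
    exact ((hperm.map Prod.fst).nodup_iff).mpr hnd
  rw [pvKeys_ofList _ hndS, pvLoopA_eq _ [] (by simp), pvLoopB_eq 5 dicoOccu []]
  -- the bonus agrees: head of the stable sort = first minimum
  cases dicoBonus with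
  | nil => exact absurd rfl hbon
  | cons x t =>
    obtain ⟨l, r, m, h1, h2, h3, h4⟩ := pvMin?_split (fun it => it.2) t x
    rw [h1, h2, pvSorted_split _ l r m h3 h4,
       show (0:Int) = ((0:Nat):Int) from rfl, PySem.List.pyGet?_natCast]
    simp
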